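-- pv_equiv track=rewrite | github.com/maple-buice/chart-hero | src/chart_hero/utils/scratch/isolate_drums.py | getNoteCountsFromMidis
-- ===== SOURCE A (Python) =====
-- def getNoteCountsFromMidis(drumNotes):
--     noteCounts: dict[int, int] = {}
--     for noteInt in drumNotes:
--         if noteInt in noteCounts:
--             noteCounts[noteInt] += 1
--         else:
--             noteCounts[noteInt] = 1
--     return dict(sorted(noteCounts.items()))
-- ===== SOURCE B (Python) =====
-- def getNoteCountsFromMidis(drumNotes):
--     # sort first, then emit one (value, run-length) pair per run of equal values
--     counts = {}
--     ordered = sorted(drumNotes)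
--     if not ordered:
--         return counts
--     cur = ordered[0]
--     cnt = 1
--     for x in ordered[1:]:
--         if x == cur:
--             cnt += 1
--         else:
--             counts[cur] = cnt
--             cur, cnt = x, 1
--     counts[cur] = cnt
--     return counts
-- ===== Notes on version B (the rewrite author's own statement) =====
-- stated objective: idiomatic
-- what changed: Replaces the hash-map accumulate-then-sort with a sort-then-group single pass: B sorts the input once and emits one (value, run-length) pair per run of equal adjacent values, so no membership test or incremental dict update appears.
import Mathlib
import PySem

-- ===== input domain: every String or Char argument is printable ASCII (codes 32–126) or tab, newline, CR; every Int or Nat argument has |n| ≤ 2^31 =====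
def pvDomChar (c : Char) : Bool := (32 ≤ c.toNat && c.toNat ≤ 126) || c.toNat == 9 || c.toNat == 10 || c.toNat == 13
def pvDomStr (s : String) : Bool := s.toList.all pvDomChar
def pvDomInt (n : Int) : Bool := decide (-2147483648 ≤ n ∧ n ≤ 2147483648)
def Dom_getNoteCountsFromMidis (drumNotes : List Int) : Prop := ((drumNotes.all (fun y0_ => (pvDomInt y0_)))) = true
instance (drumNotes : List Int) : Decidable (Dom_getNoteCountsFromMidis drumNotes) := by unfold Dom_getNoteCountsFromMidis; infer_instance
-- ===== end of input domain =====

-- B replaces A's hash-map accumulate-then-sort with a sort-then-group single pass (same asymptotic cost, more idiomatic).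


-- ===== PORT A =====
-- the counting loop (noteCounts[noteInt] += 1 if present, else = 1), then dict(sorted(noteCounts.items()))
-- (sorted on pairs compares lexicographically: sorted2 with keys fst, snd)
def getNoteCountsFromMidis (drumNotes : List Int) : List (Int × Int) :=
  let noteCounts : PySem.Dict Int Int :=
    drumNotes.foldl
      (fun d noteInt =>
        if d.contains noteInt then d.insert noteInt (d.getD noteInt 0 + 1)
        else d.insert noteInt 1)
      PySem.Dict.empty
  PySem.List.sorted2 noteCounts.items Prod.fst Prod.snd false

-- ===== PORT B =====
-- run-length scan of the sorted list: emit (cur, cnt) whenever the value changes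
def pvRuns : Int → Int → List Int → List (Int × Int)
  | cur, cnt, [] => [(cur, cnt)]
  | cur, cnt, x :: rest => if x = cur then pvRuns cur (cnt + 1) rest else (cur, cnt) :: pvRuns x 1 rest

def getNoteCountsFromMidis_alt (drumNotes : List Int) : List (Int × Int) :=
  match PySem.List.sorted drumNotes (fun x => x) false with
  | [] => []
  | x :: rest => pvRuns x 1 rest

-- ===== PRECONDITION & SPEC =====
def Spec_getNoteCountsFromMidis (drumNotes : List Int) (out : List (Int × Int)) : Prop := out = getNoteCountsFromMidis_alt drumNotes
instance (drumNotes : List Int) (out : List (Int × Int)) : Decidable (Spec_getNoteCountsFromMidis drumNotes out) := by unfold Spec_getNoteCountsFromMidis; infer_instance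

-- ===== CLAIM (what is proved, stated in full; the proofs are below) =====
def Claim_equal_getNoteCountsFromMidis : Prop := ∀ (drumNotes : List Int), Dom_getNoteCountsFromMidis drumNotes → Spec_getNoteCountsFromMidis drumNotes (getNoteCountsFromMidis drumNotes)

-- ===== LEMMAS AND PROOFS =====

-- the common canonical form both programs compute: keys ascending, value = multiplicity
def pvCanon (xs : List Int) : List (Int × Int) :=
  (PySem.List.sorted (PySem.Set.ofList xs) (fun x => x) false).map (fun k => (k, (xs.count k : Int)))

-- B's whole grouping pass as a function of the sorted list
def pvGroup : List Int → List (Int × Int)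
  | [] => []
  | x :: rest => pvRuns x 1 rest

-- insertBy with the lexicographic 'before' agrees with insertBy on the first component when the inserted key is fresh
theorem pv_insertBy_lex_eq (x : Int × Int) (acc : List (Int × Int))
    (h : ∀ y ∈ acc, y.1 ≠ x.1) :
    PySem.List.insertBy (fun a b : Int × Int => decide (a.1 < b.1) || !decide (b.1 < a.1) && decide (a.2 < b.2)) x acc
      = PySem.List.insertBy (fun a b : Int × Int => decide (a.1 < b.1)) x acc := by
  induction acc with
  | nil => rfl
  | cons y ys ih =>
    have hne : x.1 ≠ y.1 := fun h' => (h y (by simp)) h'.symm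
    simp only [PySem.List.insertBy]
    by_cases hxy : x.1 < y.1
    · simp [hxy]
    · have hyx : y.1 < x.1 := lt_of_le_of_ne (not_lt.mp hxy) (fun h' => hne h'.symm)
      simp [hxy, ih (fun y hy => h y (by simp [hy]))]
      exact fun hle _ => absurd hle (not_le.mpr hyx)

theorem pv_foldl_insertBy_eq (xs : List (Int × Int)) : ∀ acc : List (Int × Int),
    (∀ y ∈ acc, ∀ x ∈ xs, y.1 ≠ x.1) → (xs.map Prod.fst).Nodup →
    xs.foldl (fun acc x => PySem.List.insertBy (fun a b : Int × Int => decide (a.1 < b.1) || !decide (b.1 < a.1) && decide (a.2 < b.2)) x acc) acc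
      = xs.foldl (fun acc x => PySem.List.insertBy (fun a b : Int × Int => decide (a.1 < b.1)) x acc) acc := by
  induction xs with
  | nil => intro acc _ _; rfl
  | cons x rest ih =>
    intro acc h hnd
    simp only [List.foldl_cons]
    rw [pv_insertBy_lex_eq x acc (fun y hy => h y hy x (by simp))]
    apply ih
    · intro y hy x' hx'
      rcases (PySem.List.mem_insertBy _ x y acc).mp hy with rfl | hy'
      · simp only [List.map_cons, List.nodup_cons] at hnd
        exact fun he => hnd.1 (he ▸ List.mem_map_of_mem hx')
      · exact h y hy' x' (by simp [hx'])
    · simp only [List.map_cons, List.nodup_cons] at hnd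
      exact hnd.2

-- sorted2 on pairs with pairwise-distinct first components is sorted by the first component
theorem pv_sorted2_eq_sorted_fst (xs : List (Int × Int)) (h : (xs.map Prod.fst).Nodup) :
    PySem.List.sorted2 xs Prod.fst Prod.snd false = PySem.List.sorted xs Prod.fst false := by
  show xs.foldl _ [] = xs.foldl _ []
  exact pv_foldl_insertBy_eq xs [] (by simp) h

-- A's counting loop is Counter(drumNotes)
theorem pv_loop_eq_counter (xs : List Int) :
    xs.foldl
      (fun d noteInt =>
        if d.contains noteInt then d.insert noteInt (d.getD noteInt 0 + 1)
        else d.insert noteInt 1)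
      PySem.Dict.empty = PySem.Dict.counter xs := by
  have hfun : (fun (d : PySem.Dict Int Int) noteInt =>
        if d.contains noteInt then d.insert noteInt (d.getD noteInt 0 + 1)
        else d.insert noteInt 1)
      = fun d noteInt => d.insert noteInt (d.getD noteInt 0 + 1) := by
    funext d n
    by_cases h : d.contains n = true
    · simp [h]
    · simp [h, PySem.Dict.getD_of_not_contains d (0 : Int) (show d.contains n = false by simpa using h)]
  rw [hfun, PySem.Dict.foldl_insert_getD_add_one_eq_counter]

theorem pv_A_eq_canon (xs : List Int) : getNoteCountsFromMidis xs = pvCanon xs := by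
  unfold getNoteCountsFromMidis
  rw [pv_loop_eq_counter]
  show PySem.List.sorted2 (PySem.Dict.counter xs).items Prod.fst Prod.snd false = pvCanon xs
  rw [PySem.Dict.items_counter]
  rw [pv_sorted2_eq_sorted_fst _ (by
    rw [List.map_map]
    have : (Prod.fst ∘ fun k : Int => (k, (xs.count k : Int))) = id := rfl
    rw [this, List.map_id]
    exact PySem.Set.nodup_ofList xs)]
  apply PySem.List.sorted_eq_of_perm_of_pairwise_lt
  · unfold pvCanon
    exact (PySem.List.sorted_perm (PySem.Set.ofList xs) (fun x => x) false).map _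
  · have h1 := PySem.List.sorted_ofList_pairwise_lt (κ := Int) xs
    unfold pvCanon
    rw [List.pairwise_map]
    exact h1

-- Set.ofList is a sublist of its argument
theorem pv_ofList_sublist (xs : List Int) : (PySem.Set.ofList xs).Sublist xs := by
  induction xs using List.reverseRecOn with
  | nil => simp [PySem.Set.ofList]
  | append_singleton ys y ih =>
    rw [PySem.Set.ofList_append_singleton, PySem.Set.add_eq_ite]
    split
    · exact ih.trans (List.sublist_append_left ys [y])
    · exact List.Sublist.append ih (List.Sublist.refl [y])

-- Set.ofList commutes with filter
theorem pv_ofList_filter (p : Int → Bool) (xs : List Int) :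
    PySem.Set.ofList (xs.filter p) = (PySem.Set.ofList xs).filter p := by
  induction xs using List.reverseRecOn with
  | nil => simp [PySem.Set.ofList]
  | append_singleton ys y ih =>
    rw [List.filter_append, PySem.Set.ofList_append_singleton, PySem.Set.add_eq_ite]
    by_cases hp : p y = true
    · have h1 : List.filter p [y] = [y] := by simp [hp]
      rw [h1, PySem.Set.ofList_append_singleton, PySem.Set.add_eq_ite]
      by_cases hm : y ∈ PySem.Set.ofList ys
      · have h2 : y ∈ PySem.Set.ofList (ys.filter p) := by
          rw [PySem.Set.mem_ofList] at hm ⊢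
          exact List.mem_filter.mpr ⟨hm, hp⟩
        rw [if_pos h2, if_pos hm, ih]
      · have h2 : y ∉ PySem.Set.ofList (ys.filter p) := by
          rw [PySem.Set.mem_ofList] at hm ⊢
          exact fun h => hm (List.mem_filter.mp h).1
        rw [if_neg h2, if_neg hm, ih, List.filter_append, h1]
    · have h1 : List.filter p [y] = [] := by simp [hp]
      rw [h1, List.append_nil, ih]
      split
      · rfl
      · rw [List.filter_append, h1, List.append_nil]

-- the run-length helper on a sorted tail whose head is minimal
theorem pv_runs_eq (rest : List Int) : ∀ (cur cnt : Int),
    (∀ y ∈ rest, cur ≤ y) → rest.Pairwise (· ≤ ·) →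
    pvRuns cur cnt rest
      = (cur, cnt + rest.count cur) :: pvGroup (rest.filter (fun y => y ≠ cur)) := by
  induction rest with
  | nil => intro cur cnt _ _; simp [pvRuns, pvGroup]
  | cons y ys ih =>
    intro cur cnt hle hpw
    rw [List.pairwise_cons] at hpw
    by_cases hy : y = cur
    · subst hy
      rw [show pvRuns y cnt (y :: ys) = pvRuns y (cnt + 1) ys from by simp [pvRuns]]
      rw [ih y (cnt + 1) hpw.1 hpw.2]
      simp only [List.count_cons_self, List.filter_cons]
      simp
      ring_nf
    · have hcur : cur < y := lt_of_le_of_ne (hle y (by simp)) (fun h => hy h.symm)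
      rw [show pvRuns cur cnt (y :: ys) = (cur, cnt) :: pvRuns y 1 ys from by simp [pvRuns, hy]]
      have hcnt : (y :: ys).count cur = 0 := by
        rw [List.count_eq_zero]
        intro hmem
        rcases List.mem_cons.mp hmem with rfl | hmem'
        · exact hy rfl
        · exact absurd (hpw.1 cur hmem') (not_le.mpr hcur)
      have hfil : (y :: ys).filter (fun y' => y' ≠ cur) = y :: ys := by
        rw [List.filter_eq_self]
        intro a ha
        rcases List.mem_cons.mp ha with rfl | ha'
        · simp [hy]
        · simp only [ne_eq, decide_eq_true_eq]
          exact fun h => absurd (hpw.1 a ha') (not_le.mpr (h ▸ hcur))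
      rw [hcnt, hfil]
      simp [pvGroup]

-- the grouping pass on any ≤-sorted list yields the canonical form of that list
theorem pv_group_eq (n : Nat) : ∀ (l : List Int), l.length ≤ n → l.Pairwise (· ≤ ·) →
    pvGroup l = (PySem.Set.ofList l).map (fun k => (k, (l.count k : Int))) := by
  induction n with
  | zero =>
    intro l hl _
    rw [List.length_eq_zero_iff.mp (Nat.le_zero.mp hl)]
    rfl
  | succ n ih =>
    intro l hl hpw
    match l with
    | [] => rfl
    | cur :: rest =>
      rw [List.pairwise_cons] at hpw
      have hstep : pvGroup (cur :: rest) = pvRuns cur 1 rest := rfl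
      rw [hstep, pv_runs_eq rest cur 1 hpw.1 hpw.2]
      rw [PySem.Set.ofList_cons]
      have hdisc : (PySem.Set.ofList rest).discard cur
          = PySem.Set.ofList (rest.filter (fun y => y ≠ cur)) := by
        rw [pv_ofList_filter]
        exact (List.filter_congr (fun a _ => by cases h : a == cur <;> simp_all)).symm
      rw [hdisc]
      set rest' := rest.filter (fun y => y ≠ cur) with hrest'
      have hlen : rest'.length ≤ n := by
        have h1 : rest'.length ≤ rest.length := by
          rw [hrest']; exact List.length_filter_le _ _
        simp only [List.length_cons] at hl
        omega
      have hpw' : rest'.Pairwise (· ≤ ·) := hpw.2.filter _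
      rw [List.map_cons]
      congr 1
      · simp only [List.count_cons_self]
        push_cast
        ring_nf
      · rw [ih rest' hlen hpw']
        apply List.map_congr_left
        intro k hk
        have hk' : k ∈ rest' := (PySem.Set.mem_ofList _ _).mp hk
        have hkne : k ≠ cur := by
          have := (List.mem_filter.mp hk').2
          simpa using this
        congr 1
        rw [hrest', List.count_filter (by simpa using hkne)]
        simp [List.count_cons]
        exact fun h => hkne h.symm

theorem pv_B_eq_canon (xs : List Int) : getNoteCountsFromMidis_alt xs = pvCanon xs := by
  have halt : getNoteCountsFromMidis_alt xs = pvGroup (PySem.List.sorted xs (fun x => x) false) := by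
    unfold getNoteCountsFromMidis_alt pvGroup
    cases PySem.List.sorted xs (fun x => x) false <;> rfl
  set l := PySem.List.sorted xs (fun x => x) false with hldef
  have hperm : l.Perm xs := PySem.List.sorted_perm xs (fun x => x) false
  have hpw : l.Pairwise (· ≤ ·) := PySem.List.sorted_pairwise xs (fun x => x)
  rw [halt, pv_group_eq l.length l (le_refl _) hpw]
  have hsub : (PySem.Set.ofList l).Sublist l := pv_ofList_sublist l
  have hnd : (PySem.Set.ofList l).Nodup := PySem.Set.nodup_ofList l
  have hpwlt : (PySem.Set.ofList l).Pairwise (· < ·) := by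
    have hle : (PySem.Set.ofList l).Pairwise (· ≤ ·) := hpw.sublist hsub
    have hne : (PySem.Set.ofList l).Pairwise (· ≠ ·) := hnd
    exact (hle.and hne).imp (fun h => lt_of_le_of_ne h.1 h.2)
  have hpermS : (PySem.Set.ofList l).Perm (PySem.Set.ofList xs) := by
    rw [List.perm_ext_iff_of_nodup hnd (PySem.Set.nodup_ofList xs)]
    intro a
    rw [PySem.Set.mem_ofList, PySem.Set.mem_ofList]
    exact hperm.mem_iff
  have hsorted : PySem.List.sorted (PySem.Set.ofList xs) (fun x => x) false = PySem.Set.ofList l :=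
    PySem.List.sorted_eq_of_perm_of_pairwise_lt _ _ _ hpermS hpwlt
  unfold pvCanon
  rw [hsorted]
  apply List.map_congr_left
  intro k _
  rw [hperm.count_eq]

-- ===== VERDICT (by name: the statement is the Claim_ definition above) =====
theorem getNoteCountsFromMidis_spec : Claim_equal_getNoteCountsFromMidis := by
  intro xs _
  unfold Spec_getNoteCountsFromMidis
  rw [pv_A_eq_canon, pv_B_eq_canon]
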